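-- pv_equiv track=rewrite | github.com/ArthurBoaro/my-daily-coding-challenge-fcc | April 14, 2026.py | get_last_letter
-- ===== SOURCE A (Python) =====
-- def get_last_letter(s):
--
--     last_word_code = 0
--     last_word = ""
--
--     for char in s:
--         if char.isalpha():
--             if ord(char.lower()) > last_word_code:
--                 last_word_code = ord(char.lower())
--                 last_word = char
--
--     return last_word
-- ===== SOURCE B (Python) =====
-- def get_last_letter(s):
--     letters = [c for c in s if c.isalpha()]
--     if not letters:
--         return ""
--     return sorted(letters, key=lambda c: ord(c.lower()), reverse=True)[0]
-- ===== Notes on version B (the rewrite author's own statement) =====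
-- stated objective: alternative
-- what changed: Replaces the manual running-max scan with two accumulators by filter-then-stable-sort (reverse=True) and taking the first element; stability preserves A's first-occurrence tie-break.
import Mathlib
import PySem

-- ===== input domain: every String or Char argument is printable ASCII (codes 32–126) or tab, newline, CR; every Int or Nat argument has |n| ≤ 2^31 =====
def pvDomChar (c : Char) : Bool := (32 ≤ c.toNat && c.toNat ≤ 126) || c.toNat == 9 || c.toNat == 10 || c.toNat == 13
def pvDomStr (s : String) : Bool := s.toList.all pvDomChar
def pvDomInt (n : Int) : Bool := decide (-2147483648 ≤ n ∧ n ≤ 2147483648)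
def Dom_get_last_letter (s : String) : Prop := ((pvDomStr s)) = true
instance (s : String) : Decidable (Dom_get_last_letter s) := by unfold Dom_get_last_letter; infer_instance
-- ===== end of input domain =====

-- B replaces A's manual running-max scan by filter + stable reverse sort + first element (alternative decomposition, same results).

-- ===== PORT A =====
def get_last_letter (s : String) : String :=
  (s.toList.foldl
    (fun (st : Int × String) char =>
      if PySem.Chars.isalpha char then
        if (((PySem.Chars.lowerChar char).toNat : Int) > st.1) then
          (((PySem.Chars.lowerChar char).toNat : Int), String.ofList [char])
        else st
      else st)
    (0, "")).2

-- ===== PORT B =====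
def get_last_letter_alt (s : String) : String :=
  let letters := s.toList.filter PySem.Chars.isalpha
  if letters = [] then ""
  else
    match PySem.List.sorted letters (fun c => ((PySem.Chars.lowerChar c).toNat : Int)) true with
    | [] => ""          -- unreachable: letters ≠ []
    | m :: _ => String.ofList [m]

-- ===== PRECONDITION & SPEC =====
def Spec_get_last_letter (s : String) (out : String) : Prop := out = get_last_letter_alt s
instance (s : String) (out : String) : Decidable (Spec_get_last_letter s out) := by unfold Spec_get_last_letter; infer_instance

-- ===== CLAIM (what is proved, stated in full; the proofs are below) =====
def Claim_equal_get_last_letter : Prop := ∀ (s : String), Dom_get_last_letter s → Spec_get_last_letter s (get_last_letter s)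

-- ===== LEMMAS AND PROOFS =====

-- the sort key
def pvKey (c : Char) : Int := ((PySem.Chars.lowerChar c).toNat : Int)

-- A's loop body
def pvStepA (st : Int × String) (char : Char) : Int × String :=
  if PySem.Chars.isalpha char then
    if (((PySem.Chars.lowerChar char).toNat : Int) > st.1) then
      (((PySem.Chars.lowerChar char).toNat : Int), String.ofList [char])
    else st
  else st

-- B's insertion step (sorted reverse=True, unfolded via sorted_rev_eq_foldl_insertBy)
def pvIns (acc : List Char) (x : Char) : List Char :=
  PySem.List.insertBy (fun a b => decide (pvKey b < pvKey a)) x acc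

-- abstraction of the insertion accumulator down to A's state
def pvView : List Char → Int × String
  | [] => (0, "")
  | m :: _ => (pvKey m, String.ofList [m])

lemma pvKey_pos (c : Char) (h : PySem.Chars.isalpha c = true) : 0 < pvKey c := by
  simp only [PySem.Chars.isalpha, PySem.Chars.isupper, PySem.Chars.islower, Bool.or_eq_true,
    Bool.and_eq_true, decide_eq_true_eq] at h
  unfold pvKey PySem.Chars.lowerChar PySem.Chars.isupper
  rcases h with ⟨h1, h2⟩ | ⟨h1, h2⟩
  · have h1' : 65 ≤ c.toNat := h1
    have h2' : c.toNat ≤ 90 := h2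
    have hv : (c.toNat + 32).isValidChar := Or.inl (by omega)
    rw [if_pos (by simp [h1, h2]), Char.toNat_ofNat, if_pos hv]
    omega
  · have h1' : 97 ≤ c.toNat := h1
    by_cases hu : (decide ('A' ≤ c) && decide (c ≤ 'Z')) = true
    · simp only [Bool.and_eq_true, decide_eq_true_eq] at hu
      have : c.toNat ≤ 90 := hu.2
      omega
    · rw [if_neg hu]
      omega

lemma pvStep_eq (c : Char) (hc : PySem.Chars.isalpha c = true) (acc : List Char) :
    pvStepA (pvView acc) c = pvView (pvIns acc c) := by
  cases acc with
  | nil =>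
    have hp : 0 < (PySem.Chars.lowerChar c).toNat := by
      have := pvKey_pos c hc
      simp only [pvKey] at this
      exact_mod_cast this
    simp [pvStepA, pvView, pvIns, PySem.List.insertBy, hc, pvKey]
    intro h0
    exact absurd h0 (by omega)
  | cons m t =>
    by_cases hgt : pvKey m < pvKey c
    · have hd : decide (pvKey m < pvKey c) = true := by simpa using hgt
      simp only [pvIns, PySem.List.insertBy, hd, if_pos]
      simp only [pvKey] at hgt
      simp [pvStepA, pvView, hc, hgt, pvKey]
    · have hd : decide (pvKey m < pvKey c) = false := by simpa using hgt
      simp only [pvIns, PySem.List.insertBy, hd, Bool.false_eq_true, if_neg, not_false_iff]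
      simp only [pvKey] at hgt
      simp [pvStepA, pvView, hc, hgt, pvKey]

lemma pvLoop (cs : List Char) (acc : List Char) :
    cs.foldl pvStepA (pvView acc) = pvView ((cs.filter PySem.Chars.isalpha).foldl pvIns acc) := by
  induction cs generalizing acc with
  | nil => rfl
  | cons c cs ih =>
    by_cases hc : PySem.Chars.isalpha c = true
    · simp only [List.foldl_cons, List.filter_cons, hc, if_pos, pvStep_eq c hc acc]
      exact ih (pvIns acc c)
    · have hc' : PySem.Chars.isalpha c = false := by simpa using hc
      simp only [List.foldl_cons, List.filter_cons, hc', pvStepA]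
      simpa [hc'] using ih acc

lemma pvA_eq (s : String) :
    get_last_letter s
      = (pvView ((s.toList.filter PySem.Chars.isalpha).foldl pvIns [])).2 := by
  have h := pvLoop s.toList []
  simp only [get_last_letter]
  change (s.toList.foldl pvStepA (pvView [])).2 = _
  rw [h]

lemma pvB_eq (s : String) :
    get_last_letter_alt s
      = (pvView (PySem.List.sorted (s.toList.filter PySem.Chars.isalpha) pvKey true)).2 := by
  simp only [get_last_letter_alt]
  set letters := s.toList.filter PySem.Chars.isalpha with hl
  by_cases h : letters = []
  · simp [h, PySem.List.sorted, pvView]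
  · have hs : PySem.List.sorted letters pvKey true ≠ [] := by
      simpa [PySem.List.sorted_eq_nil_iff] using h
    cases hsort : PySem.List.sorted letters pvKey true with
    | nil => exact absurd hsort hs
    | cons m t =>
      simp only [if_neg h]
      have hk : (fun c => ((PySem.Chars.lowerChar c).toNat : Int)) = pvKey := rfl
      rw [hk, hsort]
      rfl

-- ===== VERDICT (by name: the statement is the Claim_ definition above) =====
theorem get_last_letter_spec : Claim_equal_get_last_letter := by
  intro s _
  unfold Spec_get_last_letter
  rw [pvA_eq, pvB_eq, PySem.List.sorted_rev_eq_foldl_insertBy]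
  rfl
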